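-- pv_equiv track=rewrite | github.com/HenryRobertRice/kattis | python/shuffling.py | out_shuff
-- ===== SOURCE A (Python) =====
-- def out_shuff(cards):
--     if len(cards) % 2 == 0:
--         mid = len(cards) // 2 - 1
--     else:
--         mid = len(cards) // 2
--     left = cards[0:mid + 1]
--     right = cards[mid + 1:]
--     output = []
--     for i in range(len(right)):
--         output.append(left[i])
--         output.append(right[i])
--     if len(cards) % 2 == 1:
--         output.append(left[-1])
--     return output
-- ===== SOURCE B (Python) =====
-- def out_shuff(cards):
--     n = len(cards)
--     half = (n + 1) // 2
--     return [cards[j // 2] if j % 2 == 0 else cards[half + j // 2] for j in range(n)]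
-- ===== Notes on version B (the rewrite author's own statement) =====
-- stated objective: alternative
-- what changed: Instead of splitting the deck into two halves and interleaving them with an index loop plus a parity-cased trailing append, B never builds the halves: it fills each output position j directly from the closed-form source index j//2 (even j) or half+j//2 (odd j) in one comprehension over range(n).
import Mathlib
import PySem

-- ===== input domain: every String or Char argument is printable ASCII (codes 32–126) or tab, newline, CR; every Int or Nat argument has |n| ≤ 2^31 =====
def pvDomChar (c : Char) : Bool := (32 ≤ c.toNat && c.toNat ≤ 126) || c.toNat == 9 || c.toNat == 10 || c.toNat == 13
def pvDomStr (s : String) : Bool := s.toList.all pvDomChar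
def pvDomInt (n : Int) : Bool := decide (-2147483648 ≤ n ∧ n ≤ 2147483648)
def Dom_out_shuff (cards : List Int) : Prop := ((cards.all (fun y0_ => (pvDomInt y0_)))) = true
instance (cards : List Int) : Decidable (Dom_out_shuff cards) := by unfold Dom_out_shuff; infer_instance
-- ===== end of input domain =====

-- B replaces A's split-into-halves-and-interleave loop by a direct permutation formula:
-- output position j is filled from cards[j//2] (even j) or cards[half + j//2] (odd j),
-- with no intermediate half lists and no parity-cased trailing append. Neither mutates its argument.

-- ===== PORT A =====
-- literal transliteration of Source A; the pyGetD defaults are never used: all loop indices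
-- are < len(right) ≤ len(left), and left is nonempty when len(cards) is odd.
def out_shuff (cards : List Int) : List Int :=
  let n : Int := cards.length
  let mid : Int := if PySem.Int.mod n 2 = 0 then PySem.Int.floordiv n 2 - 1 else PySem.Int.floordiv n 2
  let left := PySem.List.slice cards (some 0) (some (mid + 1))
  let right := PySem.List.slice cards (some (mid + 1)) none
  let output := (PySem.List.pyRange 0 (right.length : Int) 1).foldl
      (fun out i => (out ++ [PySem.List.pyGetD left i 0]) ++ [PySem.List.pyGetD right i 0]) []
  if PySem.Int.mod n 2 = 1 then output ++ [PySem.List.pyGetD left (-1) 0] else output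

-- ===== PORT B =====
-- literal transliteration of Source B: a comprehension over range(n) reading cards at the
-- closed-form source index; indices are always in range, so the pyGetD default is never used.
def out_shuff_alt (cards : List Int) : List Int :=
  let n : Int := cards.length
  let half : Int := PySem.Int.floordiv (n + 1) 2
  (PySem.List.pyRange 0 n 1).map (fun j =>
    if PySem.Int.mod j 2 = 0 then PySem.List.pyGetD cards (PySem.Int.floordiv j 2) 0
    else PySem.List.pyGetD cards (half + PySem.Int.floordiv j 2) 0)

-- ===== PRECONDITION & SPEC =====
def Spec_out_shuff (cards : List Int) (out : List Int) : Prop := out = out_shuff_alt cards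
instance (cards : List Int) (out : List Int) : Decidable (Spec_out_shuff cards out) := by unfold Spec_out_shuff; infer_instance

-- ===== CLAIM (what is proved, stated in full; the proofs are below) =====
def Claim_equal_out_shuff : Prop := ∀ (cards : List Int), Dom_out_shuff cards → Spec_out_shuff cards (out_shuff cards)

-- ===== LEMMAS AND PROOFS =====

def zipFlat (l r : List Int) : List Int := (l.zip r).flatMap (fun p => [p.1, p.2])

theorem zipFlat_cons (a b : Int) (l r : List Int) :
    zipFlat (a :: l) (b :: r) = a :: b :: zipFlat l r := by
  simp [zipFlat]

theorem zipFlat_length (l r : List Int) (h : r.length ≤ l.length) :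
    (zipFlat l r).length = 2 * r.length := by
  induction r generalizing l with
  | nil => simp [zipFlat]
  | cons b rt ih =>
    cases l with
    | nil => simp at h
    | cons a lt =>
      simp only [List.length_cons] at h
      rw [zipFlat_cons]
      simp only [List.length_cons]
      rw [ih lt (by omega)]
      omega

theorem zipFlat_getD (l r : List Int) (j : Nat) (hlen : r.length ≤ l.length)
    (hj : j < 2 * r.length) :
    (zipFlat l r).getD j 0 = if j % 2 = 0 then l.getD (j / 2) 0 else r.getD (j / 2) 0 := by
  induction r generalizing l j with
  | nil => simp at hj
  | cons b rt ih =>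
    cases l with
    | nil => simp at hlen
    | cons a lt =>
      simp only [List.length_cons] at hlen hj
      rw [zipFlat_cons]
      match j with
      | 0 => simp
      | 1 => simp
      | (k + 2) =>
        have : (k + 2) % 2 = k % 2 := by omega
        have h2 : (k + 2) / 2 = k / 2 + 1 := by omega
        simp only [List.getD_cons_succ]
        rw [ih lt k (by omega) (by omega), this, h2]
        split <;> simp

-- loop lemma reused for the characterisation above
theorem rloop (r l acc : List Int) (h : r.length ≤ l.length) :
    (List.range r.length).foldl (fun out k => (out ++ [l.getD k 0]) ++ [r.getD k 0]) acc
      = acc ++ zipFlat l r := by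
  induction r generalizing l acc with
  | nil => simp [zipFlat]
  | cons rh rt ih =>
    cases l with
    | nil => simp at h
    | cons lh lt =>
      simp only [List.length_cons] at h
      rw [List.length_cons, List.range_succ_eq_map]
      simp only [List.foldl_cons, List.foldl_map, List.getD_cons_zero, List.getD_cons_succ]
      rw [ih lt (acc ++ [lh] ++ [rh]) (by omega), zipFlat_cons]
      simp

theorem drop_length_sub_one (l : List Int) (h : l ≠ []) :
    l.drop (l.length - 1) = [l.getLast h] := by
  induction l with
  | nil => exact absurd rfl h
  | cons x xs ih =>
    cases xs with
    | nil => simp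
    | cons y ys =>
      simp only [List.length_cons, Nat.add_sub_cancel, List.drop_succ_cons]
      have := ih (by simp)
      simpa [List.getLast] using this

-- A's result characterised as an interleave of the two halves plus the odd leftover.
theorem out_shuff_eq_zipFlat (cards : List Int) :
    out_shuff cards =
      zipFlat (cards.take ((cards.length + 1) / 2)) (cards.drop ((cards.length + 1) / 2))
        ++ (cards.take ((cards.length + 1) / 2)).drop (cards.drop ((cards.length + 1) / 2)).length := by
  have hmid : (if PySem.Int.mod (cards.length : Int) 2 = 0
        then PySem.Int.floordiv (cards.length : Int) 2 - 1
        else PySem.Int.floordiv (cards.length : Int) 2) + 1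
      = (((cards.length + 1) / 2 : Nat) : Int) := by
    rw [show PySem.Int.mod ((cards.length : Nat) : Int) 2 = ((cards.length % 2 : Nat) : Int) by
          exact_mod_cast PySem.Int.mod_natCast cards.length 2,
        show PySem.Int.floordiv ((cards.length : Nat) : Int) 2 = ((cards.length / 2 : Nat) : Int) by
          exact_mod_cast PySem.Int.floordiv_natCast cards.length 2]
    rcases Nat.even_or_odd cards.length with he | ho
    · have h0 : cards.length % 2 = 0 := Nat.even_iff.mp he
      rw [h0]; norm_num; omega
    · have h0 : cards.length % 2 = 1 := Nat.odd_iff.mp ho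
      rw [h0]; norm_num; omega
  set h : Nat := (cards.length + 1) / 2 with hh
  simp only [out_shuff]
  rw [hmid]
  rw [PySem.List.slice_zero_start]
  rw [PySem.List.slice_to_natCast, PySem.List.slice_from_natCast]
  set L : List Int := cards.take h with hL
  set R : List Int := cards.drop h with hR
  have hLlen : L.length = min h cards.length := by simp [hL]
  have hRlen : R.length = cards.length - h := by simp [hR]
  have hhn : h ≤ cards.length := by omega
  have hRL : R.length ≤ L.length := by omega
  have hparity : PySem.Int.mod ((cards.length : Nat) : Int) 2 = ((cards.length % 2 : Nat) : Int) := by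
    exact_mod_cast PySem.Int.mod_natCast cards.length 2
  have hloop : (PySem.List.pyRange 0 (R.length : Int) 1).foldl
      (fun out i => (out ++ [PySem.List.pyGetD L i 0]) ++ [PySem.List.pyGetD R i 0]) []
      = zipFlat L R := by
    rw [PySem.List.pyRange_one]
    simp only [Int.sub_zero, Int.toNat_natCast, List.foldl_map, Int.zero_add,
      PySem.List.pyGetD_natCast]
    exact rloop R L [] hRL
  rw [hloop]
  rcases Nat.even_or_odd cards.length with he | ho
  · have h0 : cards.length % 2 = 0 := Nat.even_iff.mp he
    have hdrop : L.drop R.length = [] := by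
      rw [List.drop_eq_nil_iff]; omega
    rw [hparity, h0, hdrop]
    simp
  · have h0 : cards.length % 2 = 1 := Nat.odd_iff.mp ho
    have hLne : L ≠ [] := by
      intro hnil
      have : L.length = 0 := by rw [hnil]; rfl
      omega
    have hLR : L.length = R.length + 1 := by omega
    have hdrop : L.drop R.length = [L.getLast hLne] := by
      have := drop_length_sub_one L hLne
      rw [hLR] at this
      simpa using this
    rw [hparity, h0, hdrop]
    simp [PySem.List.pyGetD_neg_one L 0 hLne]


-- B's result in Nat form
theorem out_shuff_alt_eq_natForm (cards : List Int) :
    out_shuff_alt cards =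
      (List.range cards.length).map (fun j =>
        if j % 2 = 0 then cards.getD (j / 2) 0
        else cards.getD ((cards.length + 1) / 2 + j / 2) 0) := by
  simp only [out_shuff_alt]
  rw [show PySem.Int.floordiv (((cards.length : Nat) : Int) + 1) 2
        = (((cards.length + 1) / 2 : Nat) : Int) by
      exact_mod_cast PySem.Int.floordiv_natCast (cards.length + 1) 2]
  rw [PySem.List.pyRange_one]
  simp only [Int.sub_zero, Int.toNat_natCast, List.map_map]
  apply List.map_congr_left
  intro j hj
  simp only [Function.comp, Int.zero_add]
  rw [show PySem.Int.mod ((j : Nat) : Int) 2 = ((j % 2 : Nat) : Int) by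
        exact_mod_cast PySem.Int.mod_natCast j 2,
      show PySem.Int.floordiv ((j : Nat) : Int) 2 = ((j / 2 : Nat) : Int) by
        exact_mod_cast PySem.Int.floordiv_natCast j 2]
  by_cases hp : j % 2 = 0
  · rw [if_pos (show ((j % 2 : Nat) : Int) = 0 by exact_mod_cast hp), if_pos hp,
        PySem.List.pyGetD_natCast]
  · have hne : ¬ (((j % 2 : Nat) : Int) = 0) := by exact_mod_cast hp
    rw [if_neg hne, if_neg hp,
        show (((cards.length + 1) / 2 : Nat) : Int) + ((j / 2 : Nat) : Int)
          = (((cards.length + 1) / 2 + j / 2 : Nat) : Int) by push_cast; ring,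
        PySem.List.pyGetD_natCast]

theorem ext_getD (a b : List Int) (hlen : a.length = b.length)
    (h : ∀ j, j < a.length → a.getD j 0 = b.getD j 0) : a = b := by
  apply List.ext_getElem hlen
  intro j h1 h2
  have := h j h1
  rwa [List.getD_eq_getElem a 0 h1, List.getD_eq_getElem b 0 h2] at this

theorem out_shuff_eq (cards : List Int) : out_shuff cards = out_shuff_alt cards := by
  rw [out_shuff_eq_zipFlat, out_shuff_alt_eq_natForm]
  set n : Nat := cards.length with hn
  set h : Nat := (n + 1) / 2 with hh
  set L : List Int := cards.take h with hL
  set R : List Int := cards.drop h with hR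
  have hhn : h ≤ n := by omega
  have hLlen : L.length = h := by simp [hL]; omega
  have hRlen : R.length = n - h := by simp [hR, hn]
  have hRL : R.length ≤ L.length := by omega
  have hzlen : (zipFlat L R).length = 2 * R.length := zipFlat_length L R hRL
  apply ext_getD
  · simp [hzlen, hLlen, hRlen]; omega
  · intro j hj
    have hjn : j < n := by
      simp only [List.length_append, hzlen, List.length_drop, hLlen] at hj
      omega
    have hmap : ((List.range n).map (fun j =>
        if j % 2 = 0 then cards.getD (j / 2) 0
        else cards.getD (h + j / 2) 0)).getD j 0
        = (if j % 2 = 0 then cards.getD (j / 2) 0 else cards.getD (h + j / 2) 0) := by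
      rw [List.getD_eq_getElem _ 0 (by simpa using hjn)]
      simp
    rw [hmap]
    have hLget : ∀ k, k < h → L.getD k 0 = cards.getD k 0 := by
      intro k hk
      rw [List.getD_eq_getElem L 0 (by omega),
          List.getD_eq_getElem cards 0 (by omega)]
      simp [hL]
    have hRget : ∀ k, k < R.length → R.getD k 0 = cards.getD (h + k) 0 := by
      intro k hk
      rw [List.getD_eq_getElem R 0 hk,
          List.getD_eq_getElem cards 0 (by omega)]
      simp [hR]
    by_cases hcase : j < 2 * R.length
    · have hstep : (zipFlat L R ++ L.drop R.length).getD j 0 = (zipFlat L R).getD j 0 := by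
        rw [List.getD_eq_getElem _ 0 hj, List.getD_eq_getElem (zipFlat L R) 0 (by omega)]
        exact List.getElem_append_left (by omega)
      rw [hstep, zipFlat_getD L R j hRL hcase]
      by_cases hp : j % 2 = 0
      · rw [if_pos hp, if_pos hp, hLget (j / 2) (by omega)]
      · rw [if_neg hp, if_neg hp, hRget (j / 2) (by omega)]
    · -- odd leftover: j = 2 * R.length = n - 1, even position, source index j / 2 = R.length
      have hj1 : j = 2 * R.length := by
        simp only [List.length_append, hzlen, List.length_drop, hLlen] at hj
        omega
      have hn1 : n = 2 * R.length + 1 := by omega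
      have hstep : (zipFlat L R ++ L.drop R.length).getD j 0 = L.getD R.length 0 := by
        rw [List.getD_eq_getElem _ 0 hj, List.getD_eq_getElem L 0 (by omega)]
        rw [List.getElem_append_right (by omega)]
        simp [hzlen, hj1]
      rw [hstep, if_pos (by omega),
          show j / 2 = R.length by omega,
          hLget R.length (by omega)]

-- ===== VERDICT (by name: the statement is the Claim_ definition above) =====
theorem out_shuff_spec : Claim_equal_out_shuff := by
  intro cards _
  unfold Spec_out_shuff
  exact out_shuff_eq cards
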